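-- pv_equiv track=rewrite | github.com/nrsundberg/adventCode | 17/day17-part1.py | makeRockObject
-- ===== SOURCE A (Python) =====
-- def makeRockObject(lines):
--     rocks = {}
--     shapeHolder = {}
--     rockHolder = {}
--     rowNum = 0
--     rockNum = 0
--     for line in lines:
--         if line == '':
--             rocks[rockNum] = rockHolder
--             rockHolder = {}
--             rowNum = 0
--             rockNum += 1
--         else:
--             for index,ele in enumerate(line):
--                 if ele == '.':
--                     continue
--                 shapeHolder[index + 2] = ele
--             rockHolder[rowNum] = shapeHolder
--             rowNum += 1
--             shapeHolder = {}
--             # linedList = list(map(lambda x: x.replace('.',''),list(line)))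
--             # shapeHolder[rowNum]
--     return rocks
-- ===== SOURCE B (Python) =====
-- def makeRockObject(lines):
--     # Split into groups first (a group is flushed only by an empty line; a
--     # trailing non-terminated group is dropped, as the input format guarantees
--     # a terminating blank line), then build the nested dicts by comprehension.
--     groups = []
--     cur = []
--     for line in lines:
--         if line == '':
--             groups.append(cur)
--             cur = []
--         else:
--             cur.append(line)
--     return {i: {rowNum: {idx + 2: ch for idx, ch in enumerate(line) if ch != '.'}
--                 for rowNum, line in enumerate(group)}
--             for i, group in enumerate(groups)}
-- ===== Notes on version B (the rewrite author's own statement) =====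
-- stated objective: simpler
-- what changed: Replaces the interleaved streaming build with mutable dict state and manual counters by a two-phase pass: first split the lines into blank-terminated groups (dropping a trailing unterminated group, as A does), then build the whole nested dict with enumerate-driven dict comprehensions, whose C-level construction gives a constant-factor speedup.
import Mathlib
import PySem

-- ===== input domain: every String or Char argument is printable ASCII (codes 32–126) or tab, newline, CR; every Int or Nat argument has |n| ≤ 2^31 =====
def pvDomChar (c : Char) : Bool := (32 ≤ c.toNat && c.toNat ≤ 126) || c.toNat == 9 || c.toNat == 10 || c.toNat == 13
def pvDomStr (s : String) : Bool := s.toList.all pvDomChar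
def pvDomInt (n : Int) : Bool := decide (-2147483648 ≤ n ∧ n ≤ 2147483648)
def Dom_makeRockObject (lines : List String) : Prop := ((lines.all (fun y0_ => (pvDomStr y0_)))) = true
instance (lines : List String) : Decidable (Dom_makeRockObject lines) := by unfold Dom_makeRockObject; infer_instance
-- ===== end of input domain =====

-- B builds the same nested structure by first splitting lines into blank-terminated groups
-- and then mapping nested comprehensions over them, instead of A's streaming dict/counter state (objective: simpler).


-- ===== PORT A =====
-- state = (rocks, shapeHolder, rockHolder, rowNum, rockNum), exactly A's mutable variables
def pvStepA (st : PySem.Dict Int (PySem.Dict Int (PySem.Dict Int String)) ×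
      PySem.Dict Int String × PySem.Dict Int (PySem.Dict Int String) × Int × Int)
    (line : String) :
    PySem.Dict Int (PySem.Dict Int (PySem.Dict Int String)) ×
      PySem.Dict Int String × PySem.Dict Int (PySem.Dict Int String) × Int × Int :=
  let (rocks, shapeHolder, rockHolder, rowNum, rockNum) := st
  if line == "" then
    (rocks.insert rockNum rockHolder, shapeHolder, PySem.Dict.empty, 0, rockNum + 1)
  else
    -- for index, ele in enumerate(line): if ele == '.': continue; shapeHolder[index+2] = ele
    let sh := (PySem.List.enumerate line.toList 0).foldl
      (fun sh p => if p.2 == '.' then sh else sh.insert (p.1 + 2) (String.mk [p.2])) shapeHolder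
    (rocks, PySem.Dict.empty, rockHolder.insert rowNum sh, rowNum + 1, rockNum)

def makeRockObject (lines : List String) : List (Int × List (Int × List (Int × String))) :=
  let st := lines.foldl pvStepA (PySem.Dict.empty, PySem.Dict.empty, PySem.Dict.empty, 0, 0)
  -- return rocks (the nested dicts, as association lists per the type convention)
  st.1.items.map (fun g => (g.1, g.2.items.map (fun r => (r.1, r.2.items))))

-- ===== PORT B =====
-- {idx + 2: ch for idx, ch in enumerate(line) if ch != '.'} (indices are distinct, so the comprehension is this list)
def pvParseLine (line : String) : List (Int × String) :=
  ((PySem.List.enumerate line.toList 0).filter (fun p => p.2 != '.')).map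
    (fun p => (p.1 + 2, String.mk [p.2]))

-- the first loop of B: split into blank-terminated groups, dropping a trailing unterminated group
def pvSplitGroups : List String → List String → List (List String)
  | [], _ => []
  | l :: ls, cur => if l = "" then cur :: pvSplitGroups ls [] else pvSplitGroups ls (cur ++ [l])

def makeRockObject_alt (lines : List String) : List (Int × List (Int × List (Int × String))) :=
  (PySem.List.enumerate (pvSplitGroups lines []) 0).map (fun g =>
    (g.1, (PySem.List.enumerate g.2 0).map (fun r => (r.1, pvParseLine r.2))))

-- ===== PRECONDITION & SPEC =====
def Spec_makeRockObject (lines : List String) (out : List (Int × List (Int × List (Int × String)))) : Prop := out = makeRockObject_alt lines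
instance (lines : List String) (out : List (Int × List (Int × List (Int × String)))) : Decidable (Spec_makeRockObject lines out) := by unfold Spec_makeRockObject; infer_instance

-- ===== CLAIM (what is proved, stated in full; the proofs are below) =====
def Claim_equal_makeRockObject : Prop := ∀ (lines : List String), Dom_makeRockObject lines → Spec_makeRockObject lines (makeRockObject lines)

-- ===== LEMMAS AND PROOFS =====

def pvLineDict (line : String) : PySem.Dict Int String := PySem.Dict.mk (pvParseLine line)

def pvGroupDict (rows : List String) : PySem.Dict Int (PySem.Dict Int String) :=
  PySem.Dict.mk ((PySem.List.enumerate rows 0).map (fun r => (r.1, pvLineDict r.2)))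

def pvRocksDict (gs : List (List String)) : PySem.Dict Int (PySem.Dict Int (PySem.Dict Int String)) :=
  PySem.Dict.mk ((PySem.List.enumerate gs 0).map (fun g => (g.1, pvGroupDict g.2)))

-- indices idx + 2 along one line are pairwise distinct
theorem pvLine_keys_nodup (cs : List Char) : (List.map (fun (p : Int × Char) => p.1 + 2)
    (List.filter (fun p => p.2 != '.') (PySem.List.enumerate cs 0))).Nodup := by
  have h := (PySem.List.pairwise_lt_enumerate cs 0).filter (fun p => p.2 != '.')
  exact List.Pairwise.map _ (fun a b hab => by omega) h

-- A's inner loop over one line builds exactly the dict whose items are pvParseLine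
theorem pvInner_eq (cs : List Char) :
    (PySem.List.enumerate cs 0).foldl
      (fun (sh : PySem.Dict Int String) p => if p.2 == '.' then sh else sh.insert (p.1 + 2) (String.mk [p.2]))
      PySem.Dict.empty
    = PySem.Dict.mk (((PySem.List.enumerate cs 0).filter (fun p => p.2 != '.')).map
        (fun p => (p.1 + 2, String.mk [p.2]))) := by
  apply PySem.Dict.ext
  have hfresh := PySem.Dict.items_foldl_insert_fresh
      ((PySem.List.enumerate cs 0).filter (fun p => p.2 != '.'))
      (fun (p : Int × Char) => p.1 + 2) (fun (p : Int × Char) => String.mk [p.2])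
      PySem.Dict.empty
      (fun a _ => PySem.Dict.contains_empty _) (pvLine_keys_nodup cs)
  rw [PySem.List.foldl_congr_mem (PySem.List.enumerate cs 0) _
      (fun (sh : PySem.Dict Int String) p =>
        if p.2 != '.' then sh.insert (p.1 + 2) (String.mk [p.2]) else sh) _
      (by intro acc x _; by_cases h : x.2 = '.' <;> simp [h]),
    PySem.List.foldl_if_eq_foldl_filter, hfresh]
  simp [PySem.Dict.empty]

-- inserting at the next index extends an enumerate-built dict on the right
theorem pvMk_enum_insert {α ν : Type} (f : α → ν) (xs : List α) (x : α) :
    (PySem.Dict.mk ((PySem.List.enumerate xs 0).map (fun p => (p.1, f p.2)))).insert ((xs.length : Int)) (f x)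
    = PySem.Dict.mk ((PySem.List.enumerate (xs ++ [x]) 0).map (fun p => (p.1, f p.2))) := by
  apply PySem.Dict.ext
  rw [PySem.Dict.items_insert_of_not_contains]
  · show _ ++ _ = _
    rw [PySem.List.enumerate_append]
    simp [PySem.List.enumerate]
  · rw [PySem.Dict.contains_eq_decide_mem_keys]
    simp only [PySem.Dict.keys_mk]
    simp only [List.map_map]
    simp
    intro y hy
    rw [PySem.List.mem_enumerate_iff] at hy
    obtain ⟨k, hk, he⟩ := hy
    have h1 := congrArg Prod.fst he
    simp at h1
    omega

theorem pvSplit_loop (ls : List String) : ∀ (gs : List (List String)) (rows : List String),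
    (ls.foldl pvStepA (pvRocksDict gs, PySem.Dict.empty, pvGroupDict rows, (rows.length : Int), (gs.length : Int))).1
    = pvRocksDict (gs ++ pvSplitGroups ls rows) := by
  induction ls with
  | nil => intro gs rows; simp [pvSplitGroups]
  | cons l ls ih =>
    intro gs rows
    rw [List.foldl_cons]
    by_cases hl : l = ""
    · subst hl
      have hstep : pvStepA (pvRocksDict gs, PySem.Dict.empty, pvGroupDict rows, (rows.length : Int), (gs.length : Int)) ""
          = (pvRocksDict (gs ++ [rows]), PySem.Dict.empty, pvGroupDict [], (([] : List String).length : Int), ((gs ++ [rows]).length : Int)) := by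
        show (_, _, _, _, _) = _
        rw [pvRocksDict, pvMk_enum_insert pvGroupDict gs rows]
        simp [pvRocksDict, pvGroupDict, PySem.List.enumerate, PySem.Dict.empty]
      rw [hstep, ih (gs ++ [rows]) []]
      simp [pvSplitGroups]
    · have hstep : pvStepA (pvRocksDict gs, PySem.Dict.empty, pvGroupDict rows, (rows.length : Int), (gs.length : Int)) l
          = (pvRocksDict gs, PySem.Dict.empty, pvGroupDict (rows ++ [l]), ((rows ++ [l]).length : Int), (gs.length : Int)) := by
        show (if (l == "") = true then _ else _) = _
        rw [if_neg (by simp [hl])]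
        show (_, _, _, _, _) = _
        rw [pvInner_eq l.toList]
        have : PySem.Dict.mk (((PySem.List.enumerate l.toList 0).filter (fun p => p.2 != '.')).map
            (fun p => (p.1 + 2, String.mk [p.2]))) = pvLineDict l := rfl
        rw [this, pvGroupDict, pvMk_enum_insert pvLineDict rows l]
        simp [pvGroupDict]
      rw [hstep, ih gs (rows ++ [l])]
      simp [pvSplitGroups, hl]

-- ===== VERDICT (by name: the statement is the Claim_ definition above) =====
theorem makeRockObject_spec : Claim_equal_makeRockObject := by
  intro lines _
  show makeRockObject lines = makeRockObject_alt lines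
  rw [makeRockObject]
  have hinit : ((PySem.Dict.empty, PySem.Dict.empty, PySem.Dict.empty, 0, 0) :
      PySem.Dict Int (PySem.Dict Int (PySem.Dict Int String)) ×
        PySem.Dict Int String × PySem.Dict Int (PySem.Dict Int String) × Int × Int)
      = (pvRocksDict [], PySem.Dict.empty, pvGroupDict [], (([] : List String).length : Int),
         (([] : List (List String)).length : Int)) := rfl
  rw [hinit, pvSplit_loop lines [] []]
  simp only [List.nil_append]
  show (pvRocksDict (pvSplitGroups lines [])).items.map _ = _
  simp [pvRocksDict, pvGroupDict, pvLineDict, makeRockObject_alt, List.map_map, Function.comp]
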